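-- pv_equiv track=rewrite | github.com/wavegate/cutie-utensils-quiz-backend | app/routes/quiz.py | determine_utensil
-- ===== SOURCE A (Python) =====
-- from typing import Dict, List
--
-- def determine_utensil(trait_counts: Dict[str, int]) -> str:
--     """Determine utensil type based on trait counts"""
--
--     # Define utensil criteria
--     utensil_criteria = {
--         "wooden_spoon": ["nurturing", "comforting", "caring", "gentle"],
--         "chef_knife": ["sharp", "precise", "efficient", "determined"],
--         "whisk": ["creative", "versatile", "energetic", "social"],
--         "cast_iron_pan": ["steady", "consistent", "reliable", "patient"],
--         "measuring_cup": ["precise", "methodical", "reliable", "organized"],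
--         "tongs": ["detail-oriented", "thorough", "patient", "systematic"],
--         "spatula": ["flexible", "adaptable", "helpful", "reliable"],
--         "grater": ["precise", "gentle", "patient", "thorough"],
--         "colander": ["filtering", "organized", "practical", "efficient"],
--         "rolling_pin": ["steady", "consistent", "reliable", "patient"],
--         "peeler": ["precise", "gentle", "patient", "thorough"]
--     }
--
--     # Calculate scores for each utensil
--     utensil_scores = {}
--     for utensil, traits in utensil_criteria.items():
--         score = sum(trait_counts.get(trait, 0) for trait in traits)
--         utensil_scores[utensil] = score
--
--     # Return the utensil with the highest score
--     return max(utensil_scores, key=utensil_scores.get)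
-- ===== SOURCE B (Python) =====
-- from typing import Dict, List
--
-- # Utensil order (tie-break order for the final selection)
-- UTENSILS = [
--     "wooden_spoon", "chef_knife", "whisk", "cast_iron_pan", "measuring_cup",
--     "tongs", "spatula", "grater", "colander", "rolling_pin", "peeler",
-- ]
--
-- # Inverted criteria: trait -> utensils whose criteria list contains it
-- TRAIT_UTENSILS = {
--     "nurturing": ["wooden_spoon"],
--     "comforting": ["wooden_spoon"],
--     "caring": ["wooden_spoon"],
--     "gentle": ["wooden_spoon", "grater", "peeler"],
--     "sharp": ["chef_knife"],
--     "precise": ["chef_knife", "measuring_cup", "grater", "peeler"],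
--     "efficient": ["chef_knife", "colander"],
--     "determined": ["chef_knife"],
--     "creative": ["whisk"],
--     "versatile": ["whisk"],
--     "energetic": ["whisk"],
--     "social": ["whisk"],
--     "steady": ["cast_iron_pan", "rolling_pin"],
--     "consistent": ["cast_iron_pan", "rolling_pin"],
--     "reliable": ["cast_iron_pan", "measuring_cup", "spatula", "rolling_pin"],
--     "patient": ["cast_iron_pan", "tongs", "grater", "rolling_pin", "peeler"],
--     "methodical": ["measuring_cup"],
--     "organized": ["measuring_cup", "colander"],
--     "detail-oriented": ["tongs"],
--     "thorough": ["tongs", "grater", "peeler"],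
--     "systematic": ["tongs"],
--     "flexible": ["spatula"],
--     "adaptable": ["spatula"],
--     "helpful": ["spatula"],
--     "filtering": ["colander"],
--     "practical": ["colander"],
-- }
--
-- def determine_utensil(trait_counts: Dict[str, int]) -> str:
--     """Determine utensil type based on trait counts"""
--     # All utensils start at 0, in tie-break order
--     scores = {u: 0 for u in UTENSILS}
--     # One pass over the input counts, crediting only the utensils indexed by each trait
--     for trait, count in trait_counts.items():
--         for u in TRAIT_UTENSILS.get(trait, []):
--             scores[u] += count
--     # First utensil with the strictly highest score
--     best = None
--     best_score = 0
--     for u, score in scores.items():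
--         if best is None or score > best_score:
--             best = u
--             best_score = score
--     return best
-- ===== Notes on version B (the rewrite author's own statement) =====
-- stated objective: alternative
-- what changed: B replaces A's utensil->traits criteria table and per-utensil scan (44 dict lookups in trait_counts) by a transposed trait->utensils index, a zero-initialized score table updated in one pass over the input counts, and an explicit first-strict-max scan instead of max(key=get).
import Mathlib
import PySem

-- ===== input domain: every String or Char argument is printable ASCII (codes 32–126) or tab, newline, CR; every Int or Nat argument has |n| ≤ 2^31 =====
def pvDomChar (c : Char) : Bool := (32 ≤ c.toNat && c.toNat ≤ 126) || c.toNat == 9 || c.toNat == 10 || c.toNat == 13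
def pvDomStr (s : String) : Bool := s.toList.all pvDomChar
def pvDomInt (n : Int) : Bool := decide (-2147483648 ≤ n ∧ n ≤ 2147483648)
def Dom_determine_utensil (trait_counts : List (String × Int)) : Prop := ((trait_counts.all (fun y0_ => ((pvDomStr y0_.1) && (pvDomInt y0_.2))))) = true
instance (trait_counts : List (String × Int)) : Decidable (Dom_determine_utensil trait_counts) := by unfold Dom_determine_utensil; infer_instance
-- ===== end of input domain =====

-- B replaces A's utensil->traits criteria table by a transposed trait->utensils index, a
-- zero-initialized score table updated in one pass over the input counts, and an explicit
-- first-strict-max scan instead of max(key=get).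


-- ===== PORT A =====
def utensilCriteria : List (String × List String) := [
  ("wooden_spoon", ["nurturing", "comforting", "caring", "gentle"]),
  ("chef_knife", ["sharp", "precise", "efficient", "determined"]),
  ("whisk", ["creative", "versatile", "energetic", "social"]),
  ("cast_iron_pan", ["steady", "consistent", "reliable", "patient"]),
  ("measuring_cup", ["precise", "methodical", "reliable", "organized"]),
  ("tongs", ["detail-oriented", "thorough", "patient", "systematic"]),
  ("spatula", ["flexible", "adaptable", "helpful", "reliable"]),
  ("grater", ["precise", "gentle", "patient", "thorough"]),
  ("colander", ["filtering", "organized", "practical", "efficient"]),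
  ("rolling_pin", ["steady", "consistent", "reliable", "patient"]),
  ("peeler", ["precise", "gentle", "patient", "thorough"])]

def determine_utensil (trait_counts : List (String × Int)) : String :=
  let tc : PySem.Dict String Int := PySem.Dict.mk trait_counts
  let scores : PySem.Dict String Int :=
    utensilCriteria.foldl
      (fun s p => s.insert p.1 ((p.2.map (fun t => tc.getD t 0)).sum)) PySem.Dict.empty
  -- max(utensil_scores, key=utensil_scores.get): every key is present, so .get = getD 0;
  -- "" is the unreachable empty-dict branch (scores always has 11 keys)
  (PySem.List.max? scores.keys (fun u => scores.getD u 0)).getD ""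

-- ===== PORT B =====
def utensilOrder : List String :=
  ["wooden_spoon", "chef_knife", "whisk", "cast_iron_pan", "measuring_cup",
   "tongs", "spatula", "grater", "colander", "rolling_pin", "peeler"]

def traitUtensils : List (String × List String) := [
  ("nurturing", ["wooden_spoon"]),
  ("comforting", ["wooden_spoon"]),
  ("caring", ["wooden_spoon"]),
  ("gentle", ["wooden_spoon", "grater", "peeler"]),
  ("sharp", ["chef_knife"]),
  ("precise", ["chef_knife", "measuring_cup", "grater", "peeler"]),
  ("efficient", ["chef_knife", "colander"]),
  ("determined", ["chef_knife"]),
  ("creative", ["whisk"]),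
  ("versatile", ["whisk"]),
  ("energetic", ["whisk"]),
  ("social", ["whisk"]),
  ("steady", ["cast_iron_pan", "rolling_pin"]),
  ("consistent", ["cast_iron_pan", "rolling_pin"]),
  ("reliable", ["cast_iron_pan", "measuring_cup", "spatula", "rolling_pin"]),
  ("patient", ["cast_iron_pan", "tongs", "grater", "rolling_pin", "peeler"]),
  ("methodical", ["measuring_cup"]),
  ("organized", ["measuring_cup", "colander"]),
  ("detail-oriented", ["tongs"]),
  ("thorough", ["tongs", "grater", "peeler"]),
  ("systematic", ["tongs"]),
  ("flexible", ["spatula"]),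
  ("adaptable", ["spatula"]),
  ("helpful", ["spatula"]),
  ("filtering", ["colander"]),
  ("practical", ["colander"])]

def determine_utensil_alt (trait_counts : List (String × Int)) : String :=
  let index : PySem.Dict String (List String) := PySem.Dict.mk traitUtensils
  let scores0 : PySem.Dict String Int :=
    utensilOrder.foldl (fun s u => s.insert u 0) PySem.Dict.empty
  -- scores[u] += count: the key is always present, so d[u] = d.get(u,0)+c is exact
  let scores : PySem.Dict String Int :=
    trait_counts.foldl
      (fun s q => (index.getD q.1 []).foldl (fun s u => s.modify u 0 (· + q.2)) s) scores0
  let best := scores.items.foldl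
      (fun (acc : Option String × Int) p =>
        if acc.1 = none ∨ acc.2 < p.2 then (some p.1, p.2) else acc)
      ((none : Option String), (0 : Int))
  best.1.getD ""  -- best is None only for an empty score dict: unreachable

-- ===== PRECONDITION & SPEC =====
-- A Python dict cannot contain duplicate keys: Pre_ excludes association lists with duplicate keys,
-- on which the two readings of the list-as-dict (first vs all occurrences) are both accidental.
def Pre_determine_utensil (trait_counts : List (String × Int)) : Prop :=
  (trait_counts.map (·.1)).Nodup
instance (trait_counts : List (String × Int)) : Decidable (Pre_determine_utensil trait_counts) := by unfold Pre_determine_utensil; infer_instance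
def pvWitness_determine_utensil : (List (String × Int)) := [("sharp", 3), ("gentle", 1)]

def Spec_determine_utensil (trait_counts : List (String × Int)) (out : String) : Prop := out = determine_utensil_alt trait_counts
instance (trait_counts : List (String × Int)) (out : String) : Decidable (Spec_determine_utensil trait_counts out) := by unfold Spec_determine_utensil; infer_instance

-- ===== CLAIM (what is proved, stated in full; the proofs are below) =====
def Claim_equal_determine_utensil : Prop := ∀ (trait_counts : List (String × Int)), Dom_determine_utensil trait_counts → Pre_determine_utensil trait_counts → Spec_determine_utensil trait_counts (determine_utensil trait_counts)

-- ===== LEMMAS AND PROOFS =====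

-- Proof-side names for the two score tables (definitionally the ports' let-bodies)
def sigmaA (tc : List (String × Int)) (p : String × List String) : Int :=
  (p.2.map (fun t => (PySem.Dict.mk tc).getD t 0)).sum

def scoresA (tc : List (String × Int)) : PySem.Dict String Int :=
  utensilCriteria.foldl
    (fun s p => s.insert p.1 ((p.2.map (fun t => (PySem.Dict.mk tc).getD t 0)).sum)) PySem.Dict.empty

def scores0B : PySem.Dict String Int :=
  utensilOrder.foldl (fun s u => s.insert u 0) PySem.Dict.empty

def scoresB (tc : List (String × Int)) : PySem.Dict String Int :=
  tc.foldl (fun s q => ((PySem.Dict.mk traitUtensils).getD q.1 []).foldl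
    (fun s u => s.modify u 0 (· + q.2)) s) scores0B

def scanStep (acc : Option String × Int) (p : String × Int) : Option String × Int :=
  if acc.1 = none ∨ acc.2 < p.2 then (some p.1, p.2) else acc

theorem portA_eq (tc : List (String × Int)) :
    determine_utensil tc
      = (PySem.List.max? (scoresA tc).keys (fun u => (scoresA tc).getD u 0)).getD "" := rfl

theorem portB_eq (tc : List (String × Int)) :
    determine_utensil_alt tc
      = ((scoresB tc).items.foldl scanStep ((none : Option String), (0 : Int))).1.getD "" := rfl

-- A's table: 11 fresh inserts append
theorem scoresA_items (tc : List (String × Int)) :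
    (scoresA tc).items = utensilCriteria.map (fun p => (p.1, sigmaA tc p)) := by
  unfold scoresA
  rw [PySem.Dict.items_foldl_insert_fresh utensilCriteria (fun p => p.1)
      (fun p => (p.2.map (fun t => (PySem.Dict.mk tc).getD t 0)).sum) PySem.Dict.empty
      (by intro a _; rfl) (by decide)]
  simp [sigmaA, PySem.Dict.empty]

theorem scoresA_keys (tc : List (String × Int)) :
    (scoresA tc).keys = utensilCriteria.map (·.1) := by
  simp only [PySem.Dict.keys, scoresA_items, List.map_map]
  rfl

-- B's literal transposed table equals the inverted index built by folding over A's criteria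
-- (hbuild below, by decide); these two lemmas characterize that fold's lookups
theorem idx_inner (u t : String) (ts : List String) (h : ts.Nodup) :
    ∀ ix : PySem.Dict String (List String),
      (ts.foldl (fun ix t' => ix.modify t' [] (· ++ [u])) ix).getD t []
        = ix.getD t [] ++ (if ts.contains t then [u] else []) := by
  induction ts with
  | nil => intro ix; simp
  | cons t' ts' ih =>
    intro ix
    obtain ⟨h1, h2⟩ := List.nodup_cons.mp h
    simp only [List.foldl_cons]
    rw [ih h2, PySem.Dict.getD_modify]
    by_cases ht : t = t'
    · subst ht
      simp [List.contains_eq_mem, h1]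
    · simp [List.contains_eq_mem, ht]

theorem idx_outer (P : List (String × List String)) (hP : ∀ p ∈ P, p.2.Nodup) (t : String) :
    ∀ ix : PySem.Dict String (List String),
      (P.foldl (fun ix p => p.2.foldl (fun ix t' => ix.modify t' [] (· ++ [p.1])) ix) ix).getD t []
        = ix.getD t [] ++ (P.filter (fun p => p.2.contains t)).map (·.1) := by
  induction P with
  | nil => intro ix; simp
  | cons p P' ih =>
    intro ix
    simp only [List.foldl_cons]
    rw [ih (fun q hq => hP q (List.mem_cons_of_mem _ hq)),
        idx_inner p.1 t p.2 (hP p List.mem_cons_self), List.filter_cons]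
    by_cases hc : t ∈ p.2
    · simp [List.contains_eq_mem, hc]
    · simp [List.contains_eq_mem, hc]

-- B's literal transposed table, characterized against A's criteria table:
-- for every trait t, its utensil list is the in-order filter of the criteria
set_option maxRecDepth 4096 in
theorem traitUtensils_getD (t : String) :
    (PySem.Dict.mk traitUtensils).getD t []
      = (utensilCriteria.filter (fun p => p.2.contains t)).map (·.1) := by
  have hbuild : PySem.Dict.mk traitUtensils
      = utensilCriteria.foldl
          (fun ix p => p.2.foldl (fun ix t' => ix.modify t' [] (· ++ [p.1])) ix)
          PySem.Dict.empty := by decide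
  rw [hbuild]
  rw [idx_outer utensilCriteria (by decide) t PySem.Dict.empty, PySem.Dict.getD_empty]
  rfl

theorem idxB_mem (t u : String) (h : u ∈ (PySem.Dict.mk traitUtensils).getD t []) :
    u ∈ utensilCriteria.map (·.1) := by
  rw [traitUtensils_getD] at h
  obtain ⟨q, hq, rfl⟩ := List.mem_map.mp h
  exact List.mem_map_of_mem (List.mem_of_mem_filter hq)

theorem count_filter_map (P : List (String × List String)) (φ : String × List String → Bool)
    (p : String × List String) (hp : p ∈ P) (hnd : (P.map (·.1)).Nodup) :
    ((P.filter φ).map (·.1)).count p.1 = if φ p then 1 else 0 := by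
  induction P with
  | nil => cases hp
  | cons q P' ih =>
    obtain ⟨hq, hnd'⟩ := List.nodup_cons.mp hnd
    rcases List.mem_cons.mp hp with h | h
    · subst h
      have hz : ((P'.filter φ).map (·.1)).count p.1 = 0 := by
        refine List.count_eq_zero.mpr (fun hm => hq ?_)
        obtain ⟨r, hr, hre⟩ := List.mem_map.mp hm
        exact List.mem_map.mpr ⟨r, List.mem_of_mem_filter hr, hre⟩
      rw [List.filter_cons]
      by_cases hφ : φ p
      · simp [hφ, hz]
      · simp [hφ, hz]
    · have hne : ¬ (q.1 = p.1) := fun e => hq (List.mem_map.mpr ⟨p, h, e.symm⟩)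
      rw [List.filter_cons]
      by_cases hφ : φ q
      · simp [hφ, hne, ih h hnd']
      · simp [hφ, ih h hnd']

-- score-table keys are preserved by the update pass
theorem keys_inner (c : Int) (L : List String) :
    ∀ s : PySem.Dict String Int, (∀ u ∈ L, s.contains u = true) →
      (L.foldl (fun s u => s.modify u 0 (· + c)) s).keys = s.keys := by
  induction L with
  | nil => intro s _; rfl
  | cons u L' ih =>
    intro s hc
    have hc' : ∀ u' ∈ L', (s.modify u 0 (· + c)).contains u' = true := by
      intro u' hu'
      rw [PySem.Dict.contains_modify]
      simp [hc u' (List.mem_cons_of_mem _ hu')]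
    simp only [List.foldl_cons]
    rw [ih _ hc', PySem.Dict.keys_modify,
        PySem.Dict.keys_insert_of_contains _ _ (hc u (List.mem_cons_self))]

theorem scoresB_keys (tc : List (String × Int)) :
    (scoresB tc).keys = utensilCriteria.map (·.1) := by
  have h0 : scores0B.keys = utensilCriteria.map (·.1) := by decide
  suffices h : ∀ (l : List (String × Int)) (s : PySem.Dict String Int),
      s.keys = utensilCriteria.map (·.1) →
      (l.foldl (fun s q => ((PySem.Dict.mk traitUtensils).getD q.1 []).foldl
          (fun s u => s.modify u 0 (· + q.2)) s) s).keys
        = utensilCriteria.map (·.1) by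
    exact h tc scores0B h0
  intro l
  induction l with
  | nil => intro s hs; exact hs
  | cons q l' ih =>
    intro s hs
    simp only [List.foldl_cons]
    have hc : ∀ u ∈ (PySem.Dict.mk traitUtensils).getD q.1 [], s.contains u = true := by
      intro u hu
      rw [PySem.Dict.contains_iff_mem_keys, hs]
      exact idxB_mem q.1 u hu
    exact ih _ (by rw [keys_inner q.2 _ s hc, hs])

-- the update pass, pointwise
theorem getD_inner (c : Int) (u : String) (L : List String) :
    ∀ s : PySem.Dict String Int,
      (L.foldl (fun s u' => s.modify u' 0 (· + c)) s).getD u 0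
        = s.getD u 0 + c * (L.count u : Int) := by
  induction L with
  | nil => intro s; simp
  | cons u' L' ih =>
    intro s
    simp only [List.foldl_cons]
    rw [ih, PySem.Dict.getD_modify]
    by_cases h : u = u'
    · subst h
      simp
      ring
    · simp [h, Ne.symm h]

theorem getD_outer (u : String) (tc : List (String × Int)) :
    ∀ s : PySem.Dict String Int,
      (tc.foldl (fun s q => ((PySem.Dict.mk traitUtensils).getD q.1 []).foldl
          (fun s u' => s.modify u' 0 (· + q.2)) s) s).getD u 0
        = s.getD u 0 + (tc.map (fun q => q.2 * (((PySem.Dict.mk traitUtensils).getD q.1 []).count u : Int))).sum := by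
  induction tc with
  | nil => intro s; simp only [List.foldl_nil, List.map_nil, List.sum_nil, add_zero]
  | cons q tc' ih =>
    intro s
    simp only [List.foldl_cons, List.map_cons, List.sum_cons]
    rw [ih, getD_inner]
    ring

-- summation swap: per-utensil trait sum = per-input-pair credit sum (needs unique dict keys)
theorem sum_ite_of_nodup (k : String) (v : Int) (g : String → Int) (hg : g k = 0)
    (ts : List String) (h : ts.Nodup) :
    (ts.map (fun t => if k == t then v else g t)).sum
      = (if ts.contains k then v else 0) + (ts.map g).sum := by
  induction ts with
  | nil => simp
  | cons t' ts' ih =>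
    obtain ⟨h1, h2⟩ := List.nodup_cons.mp h
    simp only [List.map_cons, List.sum_cons, ih h2, List.contains_eq_mem, List.mem_cons]
    by_cases hk : k = t'
    · subst hk
      simp [h1, hg]
    · simp only [hk, beq_iff_eq, if_false, false_or]
      by_cases hm : k ∈ ts' <;> simp only [hm] <;> ring

theorem sum_swap (ts : List String) (hts : ts.Nodup) (tc : List (String × Int))
    (hk : (tc.map (·.1)).Nodup) :
    (ts.map (fun t => (PySem.Dict.mk tc).getD t 0)).sum
      = (tc.map (fun q => q.2 * (if ts.contains q.1 then 1 else 0))).sum := by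
  induction tc with
  | nil =>
    have h0 : ∀ t : String, (PySem.Dict.mk ([] : List (String × Int))).getD t 0 = 0 := fun _ => rfl
    simp [h0]
  | cons q tc' ih =>
    obtain ⟨h1, h2⟩ := List.nodup_cons.mp hk
    have hco : (PySem.Dict.mk tc').contains q.1 = false := by
      rw [PySem.Dict.contains_mk]
      simp only [List.any_eq_false]
      intro r hr e
      exact h1 (List.mem_map.mpr ⟨r, hr, by simpa using e⟩)
    have hcons : ∀ t : String, (PySem.Dict.mk (q :: tc')).getD t 0
        = if q.1 == t then q.2 else (PySem.Dict.mk tc').getD t 0 := by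
      intro t
      obtain ⟨a, b⟩ := q
      rw [PySem.Dict.getD_eq_get?_getD, PySem.Dict.get?_mk_cons]
      by_cases he : (a == t) = true
      · simp [he]
      · simp [he, PySem.Dict.getD_eq_get?_getD]
    have hg : (PySem.Dict.mk tc').getD q.1 0 = 0 :=
      PySem.Dict.getD_of_not_contains _ 0 hco
    simp only [hcons]
    rw [sum_ite_of_nodup q.1 q.2 _ hg ts hts, ih h2]
    simp only [List.map_cons, List.sum_cons, mul_ite, mul_one, mul_zero]

theorem scoresB_getD (tc : List (String × Int)) (hk : (tc.map (·.1)).Nodup)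
    (p : String × List String) (hp : p ∈ utensilCriteria) :
    (scoresB tc).getD p.1 0 = sigmaA tc p := by
  have h0 : ∀ u ∈ utensilCriteria.map (·.1), scores0B.getD u 0 = 0 := by decide
  have hcount : ∀ q : String × Int,
      (((PySem.Dict.mk traitUtensils).getD q.1 []).count p.1 : Int) = if p.2.contains q.1 then 1 else 0 := by
    intro q
    rw [traitUtensils_getD, count_filter_map utensilCriteria (fun r => r.2.contains q.1) p hp (by decide)]
    split <;> simp
  unfold scoresB sigmaA
  rw [getD_outer, h0 p.1 (List.mem_map_of_mem hp), zero_add]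
  simp only [hcount]
  exact (sum_swap p.2 (by
    have h : ∀ r ∈ utensilCriteria, r.2.Nodup := by decide
    exact h p hp) tc hk).symm

theorem scores_eq (tc : List (String × Int)) (hk : (tc.map (·.1)).Nodup) :
    scoresB tc = scoresA tc := by
  apply PySem.Dict.ext
  rw [scoresA_items, PySem.Dict.items_eq_map_keys (scoresB tc) (by rw [scoresB_keys]; decide) 0,
      scoresB_keys, List.map_map]
  refine List.map_congr_left ?_
  intro p hp
  simp [scoresB_getD tc hk p hp]

-- the two selection loops agree
theorem scan_pick (f : String → Int) (t : List String) :
    ∀ b : String,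
      (t.map (fun u => (u, f u))).foldl scanStep (some b, f b)
        = (some (t.foldl (fun m y => if f m < f y then y else m) b),
           f (t.foldl (fun m y => if f m < f y then y else m) b)) := by
  induction t with
  | nil => intro b; rfl
  | cons y t' ih =>
    intro b
    simp only [List.map_cons, List.foldl_cons, scanStep]
    by_cases h : f b < f y
    · simp [h, ih]
    · simp [h, ih]

theorem max_q_cons (f : String → Int) (t : List String) :
    ∀ b : String,
      PySem.List.max? (b :: t) f
        = some (t.foldl (fun m y => if f m < f y then y else m) b) := by
  induction t with
  | nil => intro b; rfl
  | cons y t' ih =>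
    intro b
    have hstep : PySem.List.max? (b :: y :: t') f
        = PySem.List.max? ((if f b < f y then y else b) :: t') f := by
      by_cases h : f b < f y <;> simp [PySem.List.max?, h]
    rw [hstep, ih]
    by_cases h : f b < f y <;> simp [h]

theorem select_eq (l : List String) (f : String → Int) :
    ((l.map (fun u => (u, f u))).foldl scanStep ((none : Option String), (0 : Int))).1.getD ""
      = (PySem.List.max? l f).getD "" := by
  cases l with
  | nil => rfl
  | cons x l' =>
    show ((l'.map (fun u => (u, f u))).foldl scanStep (scanStep (none, 0) (x, f x))).1.getD ""
      = _
    have h1 : scanStep ((none : Option String), (0 : Int)) (x, f x) = (some x, f x) := by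
      simp [scanStep]
    rw [h1, scan_pick, max_q_cons]

-- ===== VERDICT (by name: the statement is the Claim_ definition above) =====
theorem determine_utensil_spec : Claim_equal_determine_utensil := by
  intro tc _hDom hPre
  unfold Spec_determine_utensil
  rw [portA_eq, portB_eq, scores_eq tc hPre]
  have hnd : (scoresA tc).keys.Nodup := by rw [scoresA_keys]; decide
  rw [PySem.Dict.items_eq_map_keys (scoresA tc) hnd 0, select_eq, scoresA_keys]
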